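-- pv_equiv track=rewrite | github.com/xanerin/sloth-bytes-challenges | 3) No Yelling/no yelling.py | noYelling
-- ===== SOURCE A (Python) =====
-- def noYelling(phrase):
--     lastIndex = -1000
--
--     for i, n in enumerate(phrase):
--         letter = phrase[len(phrase) - (i + 1)]
--
--         if letter == "?" or letter == "!":
--             lastIndex = len(phrase) - (i + 1)
--         else:
--             if lastIndex == -1000:
--                 return phrase
--             else:
--                 return phrase[0:lastIndex+1]
--
--     if phrase[0] == "!":
--         return "!"
--     elif phrase[0] == "?":
--         return "?"
--     else:
--         return phrase
-- ===== SOURCE B (Python) =====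
-- def noYelling(phrase):
--     # single forward pass: track the start index of the punctuation run
--     # that is current at the point we have scanned to; at the end it is
--     # the start of the trailing run (or None if the string does not end
--     # in punctuation).
--     start = None
--     for i, ch in enumerate(phrase):
--         if ch == "?" or ch == "!":
--             if start is None:
--                 start = i
--         else:
--             start = None
--     if start is None:
--         return phrase
--     return phrase[:start + 1]
-- ===== Notes on version B (the rewrite author's own statement) =====
-- stated objective: alternative
-- what changed: A scans the string from the END with index arithmetic and a -1000 sentinel, returning early at the first non-punctuation character; B is a single FORWARD pass that maintains the start index of the current punctuation run and takes one prefix slice at the end.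
import Mathlib
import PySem

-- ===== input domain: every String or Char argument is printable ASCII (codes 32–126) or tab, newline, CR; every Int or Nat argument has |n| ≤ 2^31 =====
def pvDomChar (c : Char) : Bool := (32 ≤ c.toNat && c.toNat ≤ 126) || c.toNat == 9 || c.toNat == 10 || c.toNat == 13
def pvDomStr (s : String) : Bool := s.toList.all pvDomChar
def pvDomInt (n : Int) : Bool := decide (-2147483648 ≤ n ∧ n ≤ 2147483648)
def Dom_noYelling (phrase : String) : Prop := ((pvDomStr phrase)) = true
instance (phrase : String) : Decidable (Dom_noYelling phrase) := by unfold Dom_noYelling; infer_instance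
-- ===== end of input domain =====

-- B replaces A's reverse scan (index arithmetic, -1000 sentinel, early returns) by one forward
-- pass tracking the start of the current punctuation run; objective: alternative.

-- ===== PORT A =====
-- the `letter == "?" or letter == "!"` test of A (and B's `ch == "?" or ch == "!"`)
def pvIsPunct (c : Char) : Bool := c == '?' || c == '!'

-- A's `for i, n in enumerate(phrase)` loop; `some r` = early return r, `none` = loop fell through.
-- Index len-(i+1) is always in range here (i < len), so getD is exact.
def noYellingGo (cs : List Char) (i : Nat) (lastIndex : Int) : Option (List Char) :=
  if _h : i < cs.length then
    let letter := cs.getD (cs.length - (i + 1)) ' '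
    if pvIsPunct letter then
      noYellingGo cs (i + 1) ((cs.length : Int) - ((i : Int) + 1))
    else
      if lastIndex = -1000 then some cs
      else some (PySem.List.slice cs (some 0) (some (lastIndex + 1)))
  else none
termination_by cs.length - i

def noYelling (phrase : String) : String :=
  let cs := phrase.toList
  match noYellingGo cs 0 (-1000) with
  | some r => String.ofList r
  | none =>
    -- phrase[0]: raises IndexError only on "", which Pre_ excludes; getD is exact otherwise
    let c0 := cs.getD 0 ' '
    if c0 = '!' then "!"
    else if c0 = '?' then "?"
    else phrase

-- ===== PORT B =====
-- B's loop body: `start` is the Option accumulator, folded over enumerate(phrase)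
def noYellingStep (start : Option Int) (p : Int × Char) : Option Int :=
  if pvIsPunct p.2 then
    match start with
    | none => some p.1
    | some _ => start
  else none

def noYelling_alt (phrase : String) : String :=
  let cs := phrase.toList
  match (PySem.List.enumerate cs 0).foldl noYellingStep none with
  | none => phrase
  | some start => String.ofList (PySem.List.slice cs (some 0) (some (start + 1)))

-- ===== PRECONDITION & SPEC =====
-- Pre_ excludes only the empty string, on which A raises IndexError (phrase[0] after the loop).
def Pre_noYelling (phrase : String) : Prop := phrase ≠ ""
instance (phrase : String) : Decidable (Pre_noYelling phrase) := by unfold Pre_noYelling; infer_instance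
def pvWitness_noYelling : String := "hello!!"

def Spec_noYelling (phrase : String) (out : String) : Prop := out = noYelling_alt phrase
instance (phrase : String) (out : String) : Decidable (Spec_noYelling phrase out) := by unfold Spec_noYelling; infer_instance

-- ===== CLAIM (what is proved, stated in full; the proofs are below) =====
def Claim_equal_noYelling : Prop := ∀ (phrase : String), Dom_noYelling phrase → Pre_noYelling phrase → Spec_noYelling phrase (noYelling phrase)

-- ===== LEMMAS AND PROOFS =====

-- A's loop re-expressed structurally over the reversed suffix still to be scanned.
def goR (cs : List Char) (rs : List Char) (lastIndex : Int) : Option (List Char) :=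
  match rs with
  | [] => none
  | c :: rs' =>
    if pvIsPunct c then goR cs rs' (rs'.length : Int)
    else
      if lastIndex = -1000 then some cs
      else some (PySem.List.slice cs (some 0) (some (lastIndex + 1)))

lemma go_eq_goR (cs : List Char) : ∀ k i L, cs.length - i = k → i ≤ cs.length →
    noYellingGo cs i L = goR cs (cs.reverse.drop i) L := by
  intro k
  induction k with
  | zero =>
    intro i L hk hi
    have hi' : i = cs.length := by omega
    subst hi'
    rw [noYellingGo]
    rw [List.drop_eq_nil_of_le (by simp)]
    simp [goR]
  | succ k ih =>
    intro i L hk hi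
    have hlt : i < cs.length := by omega
    have hrev : i < cs.reverse.length := by simpa using hlt
    have hdrop : cs.reverse.drop i = cs.reverse[i] :: cs.reverse.drop (i + 1) :=
      List.drop_eq_getElem_cons hrev
    have hget : cs.reverse[i] = cs[cs.length - 1 - i]'(by omega) := by
      rw [List.getElem_reverse]
    have hgetD : cs.getD (cs.length - (i + 1)) ' ' = cs.reverse[i] := by
      rw [hget, List.getD_eq_getElem _ _ (by omega)]
      congr 1
      omega
    rw [noYellingGo, hdrop]
    simp only [hlt, dif_pos, goR, hgetD, hget]
    by_cases hp : pvIsPunct (cs[cs.length - 1 - i]'(by omega)) = true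
    · simp only [hp, if_true]
      rw [ih (i + 1) _ (by omega) (by omega)]
      congr 1
      simp only [List.length_drop, List.length_reverse]
      omega
    · simp [hp]

lemma goR_all_punct (cs : List Char) : ∀ rs L, (∀ c ∈ rs, pvIsPunct c = true) →
    goR cs rs L = none := by
  intro rs
  induction rs with
  | nil => intro L _; rfl
  | cons c rs' ih =>
    intro L h
    rw [goR]
    simp only [h c (by simp), if_true]
    exact ih _ (fun x hx => h x (by simp [hx]))

lemma goR_punct_run (cs rs : List Char) : ∀ run L, run ≠ [] → (∀ c ∈ run, pvIsPunct c = true) →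
    goR cs (run ++ rs) L = goR cs rs (rs.length : Int) := by
  intro run
  induction run with
  | nil => intro L h _; exact absurd rfl h
  | cons r run' ih =>
    intro L _ h
    rw [List.cons_append, goR]
    simp only [h r (by simp), if_true]
    cases hrun' : run' with
    | nil => simp
    | cons a b =>
      rw [← hrun']
      exact ih _ (by simp [hrun']) (fun x hx => h x (by simp [hx]))

-- B's forward fold computes the start index of the trailing punctuation run (or none).
lemma foldl_step_eq (cs : List Char) :
    (PySem.List.enumerate cs 0).foldl noYellingStep none =
      (if cs.reverse.takeWhile pvIsPunct = [] then none
       else some ((cs.length : Int) - (cs.reverse.takeWhile pvIsPunct).length)) := by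
  induction cs using List.reverseRecOn with
  | nil => simp [PySem.List.enumerate]
  | append_singleton ys c ih =>
    rw [PySem.List.enumerate_append, List.foldl_append, ih]
    simp only [PySem.List.enumerate, List.foldl, List.reverse_append, List.reverse_cons,
      List.reverse_nil, List.nil_append, List.cons_append, List.length_append,
      List.length_cons, List.length_nil]
    by_cases hp : pvIsPunct c = true
    · rw [List.takeWhile_cons_of_pos hp]
      have hle : (ys.reverse.takeWhile pvIsPunct).length ≤ ys.length := by
        calc (ys.reverse.takeWhile pvIsPunct).length ≤ ys.reverse.length :=
              (List.takeWhile_sublist _).length_le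
          _ = ys.length := by simp
      by_cases hrun : ys.reverse.takeWhile pvIsPunct = []
      · simp only [hrun, if_pos, reduceCtorEq, if_false, noYellingStep, hp]
        norm_num
      · simp only [if_neg hrun, reduceCtorEq, if_false, noYellingStep, hp, if_true,
          List.length_cons, Option.some.injEq]
        push_cast
        ring
    · rw [List.takeWhile_cons_of_neg (by simp [hp])]
      simp [noYellingStep, hp]

-- ===== VERDICT (by name: the statement is the Claim_ definition above) =====
theorem noYelling_spec : Claim_equal_noYelling := by
  intro phrase _hdom hpre
  unfold Spec_noYelling noYelling noYelling_alt
  dsimp only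
  set cs := phrase.toList with hcs
  have hne : cs ≠ [] := by
    rw [hcs]; simpa using hpre
  have hgo : noYellingGo cs 0 (-1000) = goR cs cs.reverse (-1000) := by
    simpa using go_eq_goR cs cs.length 0 (-1000) (by omega) (by omega)
  have hsplit : cs.reverse.takeWhile pvIsPunct ++ cs.reverse.dropWhile pvIsPunct = cs.reverse :=
    List.takeWhile_append_dropWhile
  set run := cs.reverse.takeWhile pvIsPunct with hrun
  set rest := cs.reverse.dropWhile pvIsPunct with hrest
  have hrunp : ∀ c ∈ run, pvIsPunct c = true := fun c hc => List.mem_takeWhile_imp hc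
  have hcs2 : cs = rest.reverse ++ run.reverse := by
    have := congrArg List.reverse hsplit
    simpa using this.symm
  have hlensum : run.length + rest.length = cs.length := by
    have := congrArg List.length hsplit
    simpa using this
  have hfold : (PySem.List.enumerate cs 0).foldl noYellingStep none =
      (if run = [] then none else some ((cs.length : Int) - run.length)) :=
    foldl_step_eq cs
  cases hrestc : rest with
  | nil =>
    -- the whole string is '?'/'!': A falls through the loop, B slices the first char
    have hnone : goR cs cs.reverse (-1000) = none := by
      rw [← hsplit, hrestc, List.append_nil]
      exact goR_all_punct cs run (-1000) hrunp
    have hrunne : run ≠ [] := by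
      intro h
      have hrev : cs.reverse = [] := by rw [← hsplit, hrestc, h]; rfl
      exact hne (by simpa using hrev)
    have hallp : ∀ c ∈ cs, pvIsPunct c = true := by
      intro c hc
      apply hrunp
      have : c ∈ cs.reverse := by simpa using hc
      rwa [← hsplit, hrestc, List.append_nil] at this
    obtain ⟨c0, t, hct⟩ := List.exists_cons_of_ne_nil hne
    have hp0 : pvIsPunct c0 = true := hallp c0 (by simp [hct])
    have hg0 : cs.getD 0 ' ' = c0 := by simp [hct]
    have hlenrun : (run.length : Int) = (cs.length : Int) := by
      rw [hrestc] at hlensum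
      simp at hlensum
      omega
    have hslice1 : PySem.List.slice cs (some 0) (some ((cs.length : Int) - run.length + 1)) = [c0] := by
      rw [hlenrun]
      have h1 : ((cs.length : Int) - (cs.length : Int) + 1) = ((1 : Nat) : Int) := by push_cast; ring
      rw [h1, PySem.List.slice_zero_start, PySem.List.slice_to_natCast, hct]
      simp
    rw [hgo, hnone, hfold, if_neg hrunne]
    dsimp only
    rw [hg0, hslice1]
    have : c0 = '?' ∨ c0 = '!' := by
      simp only [pvIsPunct, Bool.or_eq_true, beq_iff_eq] at hp0
      exact hp0
    rcases this with h0 | h0 <;> subst h0 <;> simp only [reduceIte] <;> decide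
  | cons c rest' =>
    have hrne : rest ≠ [] := by simp [hrestc]
    have hpc : pvIsPunct c = false := by
      have := List.head_dropWhile_not pvIsPunct (l := cs.reverse) (by rw [← hrest]; exact hrne)
      simpa [← hrest, hrestc] using this
    cases hrunc : run with
    | nil =>
      -- no trailing punctuation: both return phrase unchanged
      have hA : goR cs cs.reverse (-1000) = some cs := by
        rw [← hsplit, hrunc, List.nil_append, hrestc, goR]
        simp [hpc]
      rw [hgo, hA, hfold, if_pos hrunc]
      simp [hcs]
    | cons r run'' =>
      -- nonempty trailing run: A slices at lastIndex, B at its start index; same prefix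
      have hrunne : run ≠ [] := by simp [hrunc]
      have hA : goR cs cs.reverse (-1000) = some (PySem.List.slice cs (some 0) (some ((rest.length : Int) + 1))) := by
        rw [← hsplit, goR_punct_run cs rest run (-1000) hrunne hrunp, hrestc, goR]
        simp only [hpc, Bool.false_eq_true, if_false, ← hrestc]
        have : (rest.length : Int) ≠ -1000 := by omega
        simp [this]
      have hidx : (cs.length : Int) - run.length = (rest.length : Int) := by
        omega
      rw [hgo, hA, hfold, if_neg hrunne]
      dsimp only
      rw [hidx]
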